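-- pv_equiv track=rewrite | github.com/vinchinzu/euler | python/383.py | count_carries_base5
-- ===== SOURCE A (Python) =====
-- BASE: int = 5
--
-- def count_carries_base5(num: int) -> int:
--     """Return the number of carries when doubling num in base 5.
--
--     This helper is used only for verification on small inputs.
--     """
--     carries = 0
--     carry = 0
--     base = BASE
--
--     while num > 0 or carry > 0:
--         digit = (num % base) * 2 + carry
--         if digit >= base:
--             carries += 1
--             carry = 1
--         else:
--             carry = 0
--         num //= base
--
--     return carries
-- ===== SOURCE B (Python) =====
-- BASE: int = 5
--
-- def count_carries_base5(num: int) -> int: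
--     """Count carries when doubling num in base 5 via Kummer's theorem:
--     one carry for each power of 5 where (2*num)//p - 2*(num//p) == 1."""
--     if num <= 0:
--         return 0
--     count = 0
--     p5 = BASE
--     while p5 <= 2 * num:
--         count += (2 * num) // p5 - 2 * (num // p5)
--         p5 *= BASE
--     return count
-- ===== Notes on version B (the rewrite author's own statement) =====
-- stated objective: alternative
-- what changed: Replaces the digit-by-digit carry-propagation loop with a stateless Kummer/Legendre sum: for each power of 5 up to 2*num add (2*num)//p - 2*(num//p), never tracking a running carry.
import Mathlib
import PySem

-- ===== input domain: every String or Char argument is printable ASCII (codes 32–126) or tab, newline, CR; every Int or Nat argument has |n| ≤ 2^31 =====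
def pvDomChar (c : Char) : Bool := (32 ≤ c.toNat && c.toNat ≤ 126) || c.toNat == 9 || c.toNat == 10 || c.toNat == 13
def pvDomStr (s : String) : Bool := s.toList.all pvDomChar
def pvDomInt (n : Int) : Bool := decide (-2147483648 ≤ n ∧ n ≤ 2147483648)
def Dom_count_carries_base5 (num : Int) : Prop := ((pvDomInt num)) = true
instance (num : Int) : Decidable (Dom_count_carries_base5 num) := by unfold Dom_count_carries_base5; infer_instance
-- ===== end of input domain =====

-- B replaces A's running-carry digit loop with a stateless Kummer/Legendre sum over powers of 5 (alternative decomposition, same cost).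

-- ===== PORT A =====
-- A's while-loop. The loop is entered only when num > 0, and then num //= 5 keeps the
-- state nonnegative (and a leftover carry dies at num = 0), so the loop state is carried
-- as Nat, where Python's % and // agree exactly with Nat.mod / Nat.div. For num ≤ 0 the
-- Python loop body never runs and returns 0, which Int.toNat = 0 reproduces.
def countCarriesLoop (num carry carries : Nat) : Nat :=
  if num > 0 ∨ carry > 0 then
    let digit := (num % 5) * 2 + carry
    if digit ≥ 5 then countCarriesLoop (num / 5) 1 (carries + 1)
    else countCarriesLoop (num / 5) 0 carries
  else carries
termination_by 2 * num + carry
decreasing_by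
  · have h : num = 0 ∨ num / 5 < num := by
      rcases Nat.eq_zero_or_pos num with h | h
      · exact Or.inl h
      · exact Or.inr (Nat.div_lt_self h (by norm_num))
    omega
  · have h : num = 0 ∨ num / 5 < num := by
      rcases Nat.eq_zero_or_pos num with h | h
      · exact Or.inl h
      · exact Or.inr (Nat.div_lt_self h (by norm_num))
    omega

def count_carries_base5 (num : Int) : Int := (countCarriesLoop num.toNat 0 0 : Int)

-- ===== PORT B =====
-- B's while-loop over powers of 5 (reached only with num > 0, so state is Nat; the
-- 0 < p5 conjunct is a totality guard only — p5 starts at 5 and is multiplied by 5).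
def carrySumLoop (n p5 count : Nat) : Nat :=
  if 0 < p5 ∧ p5 ≤ 2 * n then
    carrySumLoop n (p5 * 5) (count + (2 * n / p5 - 2 * (n / p5)))
  else count
termination_by 2 * n + 1 - p5
decreasing_by omega

def count_carries_base5_alt (num : Int) : Int :=
  if num ≤ 0 then 0 else (carrySumLoop num.toNat 5 0 : Int)

-- ===== PRECONDITION & SPEC =====
def Spec_count_carries_base5 (num : Int) (out : Int) : Prop := out = count_carries_base5_alt num
instance (num : Int) (out : Int) : Decidable (Spec_count_carries_base5 num out) := by unfold Spec_count_carries_base5; infer_instance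

-- ===== CLAIM (what is proved, stated in full; the proofs are below) =====
def Claim_equal_count_carries_base5 : Prop := ∀ (num : Int), Dom_count_carries_base5 num → Spec_count_carries_base5 num (count_carries_base5 num)

-- ===== LEMMAS AND PROOFS =====

-- Ghost loop abstracting B's iteration: state (m, c) = (num at A's current position,
-- carry into that position); B's condition 5*p ≤ 2*n and increment become 2*m + c ≥ 5
-- and (2*m+c)/5 - 2*(m/5).
def ghostLoop (m c acc : Nat) : Nat :=
  if 2 * m + c ≥ 5 then
    ghostLoop (m / 5) ((2 * m + c) / 5 - 2 * (m / 5)) (acc + ((2 * m + c) / 5 - 2 * (m / 5)))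
  else acc
termination_by 2 * m + c
decreasing_by omega

lemma two_mul_div_le (n p : Nat) : 2 * (n / p) ≤ 2 * n / p :=
  Nat.mul_div_le_mul_div_assoc 2 n p

lemma two_mul_div_le' (n p : Nat) (hp : 0 < p) : 2 * n / p ≤ 2 * (n / p) + 1 := by
  have h := Nat.div_add_mod n p
  have hlt : n % p < p := Nat.mod_lt _ hp
  have h2 : 2 * n < p * (2 * (n / p) + 2) := by nlinarith
  have := Nat.div_lt_of_lt_mul h2
  omega

-- A's loop equals the ghost loop whenever the carry is 0 or 1.
lemma countCarriesLoop_eq_ghost : ∀ m c acc, c ≤ 1 →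
    countCarriesLoop m c acc = ghostLoop m c acc := by
  intro m
  induction m using Nat.strong_induction_on with
  | _ m ih =>
    intro c acc hc
    rw [countCarriesLoop, ghostLoop]
    dsimp only
    have hmod := Nat.div_add_mod m 5
    have hmod5 : m % 5 < 5 := Nat.mod_lt _ (by norm_num)
    rcases Nat.eq_zero_or_pos m with hm | hm
    · subst hm
      split_ifs with h1 h2 h3 h4 <;> try omega
      · rw [countCarriesLoop]; simp
    · have hdiv : m / 5 < m := Nat.div_lt_self hm (by norm_num)
      split_ifs with h1 h2 h3 h4 <;> try omega
      · -- digit ≥ 5 and 2m+c ≥ 5: new carry is 1 = (2m+c)/5 - 2*(m/5)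
        have he : (2 * m + c) / 5 - 2 * (m / 5) = 1 := by omega
        rw [he, ih _ hdiv 1 _ (by omega)]
      · -- digit < 5 and 2m+c ≥ 5: new carry is 0 = (2m+c)/5 - 2*(m/5)
        have he : (2 * m + c) / 5 - 2 * (m / 5) = 0 := by omega
        rw [he, ih _ hdiv 0 _ (by omega)]
        simp
      · -- digit < 5 and 2m+c < 5: one more A-iteration (m ≤ 2), then both stop
        rw [ih _ hdiv 0 _ (by omega), ghostLoop]
        have h0 : m / 5 = 0 := by omega
        rw [h0]
        simp

-- B's loop equals the ghost loop at state (n/p, 2n/p - 2(n/p)) when its power is 5*p.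
lemma carrySumLoop_eq_ghost : ∀ m n p acc, 0 < p → n / p = m →
    carrySumLoop n (5 * p) acc = ghostLoop m (2 * n / p - 2 * m) acc := by
  intro m
  induction m using Nat.strong_induction_on with
  | _ m ih =>
    intro n p acc hp hm
    subst hm
    have hle := two_mul_div_le n p
    have hle' := two_mul_div_le' n p hp
    have hcond : 5 * p ≤ 2 * n ↔ 5 ≤ 2 * n / p := (Nat.le_div_iff_mul_le hp).symm
    have hdd : n / p / 5 = n / (5 * p) := by
      rw [Nat.div_div_eq_div_mul, Nat.mul_comm p 5]
    have hdd2 : 2 * n / p / 5 = 2 * n / (5 * p) := by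
      rw [Nat.div_div_eq_div_mul, Nat.mul_comm p 5]
    rw [carrySumLoop, ghostLoop]
    have hsum : 2 * (n / p) + (2 * n / p - 2 * (n / p)) = 2 * n / p := by omega
    rw [hsum]
    split_ifs with h1 h2 h3
    · -- both loop: align the recursive states
      have h5p : (0:Nat) < 5 * p := by omega
      have harg : 5 * p * 5 = 5 * (5 * p) := by ring
      have hmlt : n / (5 * p) < n / p := by
        rw [← hdd]
        exact Nat.div_lt_self (by omega) (by norm_num)
      rw [harg, hdd, hdd2]
      exact ih (n / (5 * p)) hmlt n (5 * p) _ h5p rfl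
    · omega
    · omega
    · rfl

lemma countCarriesLoop_zero (acc : Nat) : countCarriesLoop 0 0 acc = acc := by
  rw [countCarriesLoop]; simp

-- ===== VERDICT (by name: the statement is the Claim_ definition above) =====
theorem count_carries_base5_spec : Claim_equal_count_carries_base5 := by
  intro num _
  unfold Spec_count_carries_base5 count_carries_base5 count_carries_base5_alt
  by_cases h : num ≤ 0
  · have h0 : num.toNat = 0 := Int.toNat_of_nonpos h
    rw [if_pos h, h0, countCarriesLoop_zero]
    simp
  · rw [if_neg h]
    congr 1
    have h1 : carrySumLoop num.toNat 5 0 = carrySumLoop num.toNat (5 * 1) 0 := by norm_num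
    rw [h1, carrySumLoop_eq_ghost num.toNat num.toNat 1 0 (by norm_num) (Nat.div_one _)]
    have h2 : 2 * num.toNat / 1 - 2 * num.toNat = 0 := by simp
    rw [h2, ← countCarriesLoop_eq_ghost _ _ _ (by norm_num)]
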